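-- pv_equiv track=rewrite | github.com/harishgovardhandamodar/Obsidian-Notes-Agent | papers-to-obsidian/obsidian_paper.py | extract_visuals_only
-- ===== SOURCE A (Python) =====
-- def extract_visuals_only(content: str):
--     lines = content.split('\n')
--     visuals = []
--     i = 0
--     while i < len(lines):
--         line = lines[i].strip()
--         # Found an image?
--         if line.startswith('!['):
--             block = [line]
--             # Check if the NEXT lines are part of the Vision Caption (Blockquotes)
--             # i.e., look for lines starting with '>' immediately following the image
--             j = i + 1
--             while j < len(lines) and lines[j].strip().startswith('>'):
--                 block.append(lines[j])
--                 j += 1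
--
--             visuals.append("\n".join(block))
--             i = j # Skip forward
--         else:
--             i += 1
--     return visuals
-- ===== SOURCE B (Python) =====
-- def extract_visuals_only(content: str):
--     # One backward pass: maintain the pending blockquote run below the current
--     # line as state, so no forward lookahead is ever needed.
--     out = []
--     caps = []
--     for raw in reversed(content.split('\n')):
--         s = raw.strip()
--         if s.startswith('!['):
--             out.append('\n'.join([s] + caps))
--             caps = []
--         elif s.startswith('>'):
--             caps = [raw] + caps
--         else:
--             caps = []
--     out.reverse()
--     return out
-- ===== Notes on version B (the rewrite author's own statement) =====
-- stated objective: alternative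
-- what changed: A scans forward with a while loop and an inner lookahead loop that jumps the outer index past each caption run; B makes a single backward pass that carries the pending blockquote run as state (no lookahead or inner loop) and reverses the collected output at the end.
import Mathlib
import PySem

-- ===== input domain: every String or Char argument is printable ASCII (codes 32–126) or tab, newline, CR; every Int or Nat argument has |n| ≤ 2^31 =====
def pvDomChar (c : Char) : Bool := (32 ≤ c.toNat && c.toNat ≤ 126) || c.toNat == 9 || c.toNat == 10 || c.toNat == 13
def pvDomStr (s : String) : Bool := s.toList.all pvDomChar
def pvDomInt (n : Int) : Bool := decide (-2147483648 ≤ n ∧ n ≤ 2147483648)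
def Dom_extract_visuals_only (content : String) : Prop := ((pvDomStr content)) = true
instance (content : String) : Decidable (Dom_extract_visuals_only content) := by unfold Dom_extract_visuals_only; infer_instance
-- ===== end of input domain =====

-- B replaces A's forward while-loop with inner lookahead by one backward pass that carries the
-- pending blockquote run as state and reverses the output at the end (objective: alternative).

-- ===== PORT A =====
-- inner while: advance j over blockquote lines, collecting them into block
-- (fuel is a pure totality guard: lines.length - j always suffices since j strictly increases)
def pvInnerA (lines : List String) (block : List String) (j : Nat) : Nat → List String × Nat
  | 0 => (block, j)
  | fuel + 1 =>
      if h : j < lines.length then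
        if PySem.Str.startswith (PySem.Str.strip lines[j]) ">" then
          pvInnerA lines (block ++ [lines[j]]) (j + 1) fuel
        else (block, j)
      else (block, j)

-- outer while over i (fuel is a pure totality guard: i strictly increases each iteration)
def pvOuterA (lines : List String) (visuals : List String) (i : Nat) : Nat → List String
  | 0 => visuals
  | fuel + 1 =>
      if h : i < lines.length then
        let line := PySem.Str.strip lines[i]
        if PySem.Str.startswith line "![" then
          let bj := pvInnerA lines [line] (i + 1) (lines.length - (i + 1))
          pvOuterA lines (visuals ++ [PySem.Str.join "\n" bj.1]) bj.2 fuel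
        else pvOuterA lines visuals (i + 1) fuel
      else visuals

def extract_visuals_only (content : String) : List String :=
  let lines := (PySem.Str.split? content "\n").getD []
  pvOuterA lines [] 0 lines.length

-- ===== PORT B =====
-- one loop-body step of B's backward pass; state = (out in reversed order, pending caption run)
def pvStepB (st : List String × List String) (raw : String) : List String × List String :=
  let s := PySem.Str.strip raw
  if PySem.Str.startswith s "![" then
    (st.1 ++ [PySem.Str.join "\n" ([s] ++ st.2)], [])
  else if PySem.Str.startswith s ">" then
    (st.1, raw :: st.2)
  else (st.1, [])

def extract_visuals_only_alt (content : String) : List String :=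
  let lines := (PySem.Str.split? content "\n").getD []
  let st := lines.reverse.foldl pvStepB ([], [])
  st.1.reverse

-- ===== PRECONDITION & SPEC =====
def Spec_extract_visuals_only (content : String) (out : List String) : Prop := out = extract_visuals_only_alt content
instance (content : String) (out : List String) : Decidable (Spec_extract_visuals_only content out) := by unfold Spec_extract_visuals_only; infer_instance

-- ===== CLAIM (what is proved, stated in full; the proofs are below) =====
def Claim_equal_extract_visuals_only : Prop := ∀ (content : String), Dom_extract_visuals_only content → Spec_extract_visuals_only content (extract_visuals_only content)

-- ===== LEMMAS AND PROOFS =====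

def pvP (l : String) : Bool := PySem.Str.startswith (PySem.Str.strip l) ">"

-- the common specification skeleton both ports are reduced to
def pvG : List String → List String
  | [] => []
  | l :: rest =>
      (if PySem.Str.startswith (PySem.Str.strip l) "![" then
        [PySem.Str.join "\n" (PySem.Str.strip l :: rest.takeWhile pvP)] else []) ++ pvG rest

theorem pvP_not_img (l : String) (h : pvP l = true) :
    PySem.Str.startswith (PySem.Str.strip l) "![" = false := by
  unfold pvP at h
  simp only [PySem.Str.startswith_eq] at h ⊢
  simp at h ⊢
  rw [PySem.Chars.startswith_iff] at h
  obtain ⟨t, ht⟩ := h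
  rw [Bool.eq_false_iff]
  intro hc
  rw [PySem.Chars.startswith_iff] at hc
  obtain ⟨u, hu⟩ := hc
  rw [← ht] at hu
  simp at hu

theorem pvImg_not_P (l : String)
    (h : PySem.Str.startswith (PySem.Str.strip l) "![" = true) : pvP l = false := by
  rw [Bool.eq_false_iff]
  intro hp
  rw [pvP_not_img l hp] at h
  exact absurd h (by simp)

theorem pvG_skip (pre rest : List String) (h : ∀ l ∈ pre, pvP l = true) :
    pvG (pre ++ rest) = pvG rest := by
  induction pre with
  | nil => rfl
  | cons l pre ih =>
      have hl := h l (by simp)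
      simp only [List.cons_append, pvG, pvP_not_img l hl]
      simp [ih (fun x hx => h x (by simp [hx]))]

theorem pvInnerA_eq (lines : List String) (fuel : Nat) (block : List String) (j : Nat)
    (hf : lines.length ≤ j + fuel) :
    pvInnerA lines block j fuel =
      (block ++ (lines.drop j).takeWhile pvP, j + ((lines.drop j).takeWhile pvP).length) := by
  induction fuel generalizing block j with
  | zero =>
      rw [pvInnerA, List.drop_eq_nil_of_le (by omega)]
      simp
  | succ fuel ih =>
      rw [pvInnerA]
      split
      · rename_i h
        have hd : lines.drop j = lines[j] :: lines.drop (j + 1) := List.drop_eq_getElem_cons h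
        split
        · rename_i hs
          rw [ih (block ++ [lines[j]]) (j + 1) (by omega)]
          rw [hd, List.takeWhile_cons, show pvP lines[j] = true from hs]
          simp; omega
        · rename_i hs
          rw [hd, List.takeWhile_cons, show pvP lines[j] = false from by simpa [pvP] using hs]
          simp
      · rename_i h
        rw [List.drop_eq_nil_of_le (by omega)]
        simp

theorem pvOuterA_eq (lines : List String) (fuel : Nat) (i : Nat) (visuals : List String)
    (hf : lines.length ≤ i + fuel) :
    pvOuterA lines visuals i fuel = visuals ++ pvG (lines.drop i) := by
  induction fuel generalizing i visuals with
  | zero =>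
      rw [pvOuterA, List.drop_eq_nil_of_le (by omega)]
      simp [pvG]
  | succ fuel ih =>
      rw [pvOuterA]
      split
      · rename_i h
        have hd : lines.drop i = lines[i] :: lines.drop (i + 1) := List.drop_eq_getElem_cons h
        show (if PySem.Str.startswith (PySem.Str.strip lines[i]) "![" = true then
            pvOuterA lines
              (visuals ++ [PySem.Str.join "\n"
                (pvInnerA lines [PySem.Str.strip lines[i]] (i + 1) (lines.length - (i + 1))).1])
              (pvInnerA lines [PySem.Str.strip lines[i]] (i + 1) (lines.length - (i + 1))).2 fuel
          else pvOuterA lines visuals (i + 1) fuel) = visuals ++ pvG (lines.drop i)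
        split
        · rename_i himg
          have hbj : pvInnerA lines [PySem.Str.strip lines[i]] (i + 1) (lines.length - (i + 1))
              = ([PySem.Str.strip lines[i]] ++ (lines.drop (i + 1)).takeWhile pvP,
                (i + 1) + ((lines.drop (i + 1)).takeWhile pvP).length) :=
            pvInnerA_eq lines (lines.length - (i + 1)) [PySem.Str.strip lines[i]] (i + 1) (by omega)
          set tw := (lines.drop (i + 1)).takeWhile pvP with htw
          have htwlen : tw.length ≤ lines.length - (i + 1) := by
            rw [htw]
            simpa using (List.takeWhile_sublist (l := lines.drop (i + 1)) (p := pvP)).length_le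
          rw [hbj]
          rw [ih ((i + 1) + tw.length)
            (visuals ++ [PySem.Str.join "\n" ([PySem.Str.strip lines[i]] ++ tw)])
            (by omega)]
          have hdw : lines.drop ((i + 1) + tw.length) = (lines.drop (i + 1)).dropWhile pvP := by
            have h1 : lines.drop ((i + 1) + tw.length) = (lines.drop (i + 1)).drop tw.length := by
              rw [List.drop_drop]
            rw [h1]
            conv_lhs => rw [← List.takeWhile_append_dropWhile (p := pvP) (l := lines.drop (i + 1))]
            rw [← htw, List.drop_left]
          have hg : pvG (lines.drop (i + 1)) = pvG ((lines.drop (i + 1)).dropWhile pvP) := by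
            conv_lhs => rw [← List.takeWhile_append_dropWhile (p := pvP) (l := lines.drop (i + 1))]
            exact pvG_skip _ _ (fun l hl => List.mem_takeWhile_imp hl)
          rw [hdw]
          simp only [hd, pvG, himg, if_pos]
          rw [← htw, ← hg]
          simp
        · rename_i himg
          rw [ih (i + 1) visuals (by omega)]
          rw [hd]
          simp only [pvG]
          rw [show PySem.Str.startswith (PySem.Str.strip lines[i]) "![" = false from by
            simpa using himg]
          simp
      · rename_i h
        rw [List.drop_eq_nil_of_le (by omega)]
        simp [pvG]

-- B's backward fold: consuming the first line last gives the step-on-head recurrence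
theorem pvFoldB_cons (l : String) (rest : List String) :
    (l :: rest).reverse.foldl pvStepB ([], []) =
      pvStepB (rest.reverse.foldl pvStepB ([], [])) l := by
  rw [List.reverse_cons, List.foldl_append]
  simp

-- invariant of B's backward pass: reversed results so far, plus the pending caption run
theorem pvFoldB_eq (lines : List String) :
    lines.reverse.foldl pvStepB ([], []) = ((pvG lines).reverse, lines.takeWhile pvP) := by
  induction lines with
  | nil => simp [pvG]
  | cons l rest ih =>
      rw [pvFoldB_cons, ih]
      unfold pvStepB
      by_cases himg : PySem.Str.startswith (PySem.Str.strip l) "![" = true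
      · rw [if_pos himg]
        simp only [pvG, himg, if_pos, List.takeWhile_cons, pvImg_not_P l himg]
        simp
      · rw [if_neg himg]
        simp only [pvG, List.takeWhile_cons]
        have himg' : PySem.Str.startswith (PySem.Str.strip l) "![" = false := by
          simpa using himg
        rw [himg']
        by_cases hp : pvP l = true
        · rw [if_pos (by simpa [pvP] using hp), hp]
          simp
        · rw [if_neg (by simpa [pvP] using hp), Bool.eq_false_iff.mpr hp]
          simp

-- ===== VERDICT (by name: the statement is the Claim_ definition above) =====
theorem extract_visuals_only_spec : Claim_equal_extract_visuals_only := by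
  intro content _
  unfold Spec_extract_visuals_only extract_visuals_only extract_visuals_only_alt
  set lines := (PySem.Str.split? content "\n").getD []
  have hA := pvOuterA_eq lines lines.length 0 [] (by omega)
  have hB := pvFoldB_eq lines
  simp only [] at hA ⊢
  rw [hA, hB]
  simp
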